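-- pv_equiv track=rewrite | github.com/curious-whq/slide | src/slide/compiler/litmus_to_c.py | collect_brace_block
-- ===== SOURCE A (Python) =====
-- from typing import List, Dict, Tuple
--
-- def collect_brace_block(lines: List[str], i: int) -> Tuple[List[str], int]:
--     """收集从含 '{' 的行开始到匹配的 '}' 为止（包含首尾）。"""
--     block = []
--     depth = 0
--     n = len(lines)
--     while i < n:
--         s = lines[i]
--         if "{" in s:
--             depth += s.count("{")
--         block.append(s)
--         if "}" in s:
--             depth -= s.count("}")
--             if depth <= 0:
--                 i += 1
--                 break
--         i += 1
--     if depth != 0: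
--         raise SyntaxError("花括号不匹配（初值块）")
--     return block, i
-- ===== SOURCE B (Python) =====
-- from typing import List, Tuple
--
-- def collect_brace_block(lines: List[str], i: int) -> Tuple[List[str], int]:
--     """Table-based: cumulative brace depth over lines[i:], then find the first closing line."""
--     tail = lines[i:]
--     cum = []
--     d = 0
--     for s in tail:
--         d += s.count("{") - s.count("}")
--         cum.append(d)
--     for j, s in enumerate(tail):
--         if "}" in s and cum[j] <= 0:
--             if cum[j] < 0:
--                 raise SyntaxError("花括号不匹配（初值块）")
--             return tail[:j + 1], i + j + 1
--     if d != 0: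
--         raise SyntaxError("花括号不匹配（初值块）")
--     return tail, i + len(tail)
-- ===== Notes on version B (the rewrite author's own statement) =====
-- stated objective: alternative
-- what changed: A's single mutable while-loop (index, depth and block accumulated together, breaking mid-loop) is replaced by a two-phase table scan: first a cumulative brace-depth table over lines[i:], then a search for the first line containing '}' whose cumulative depth is <= 0, returning a slice of the tail.
-- outside the precondition, e.g. on collect_brace_block(['x'], -1): A returns (['x', 'x'], 1), B returns (['x'], 0); on collect_brace_block(['}', '{'], -1): A returns (['{', '}'], 1), B raises SyntaxError
import Mathlib
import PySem

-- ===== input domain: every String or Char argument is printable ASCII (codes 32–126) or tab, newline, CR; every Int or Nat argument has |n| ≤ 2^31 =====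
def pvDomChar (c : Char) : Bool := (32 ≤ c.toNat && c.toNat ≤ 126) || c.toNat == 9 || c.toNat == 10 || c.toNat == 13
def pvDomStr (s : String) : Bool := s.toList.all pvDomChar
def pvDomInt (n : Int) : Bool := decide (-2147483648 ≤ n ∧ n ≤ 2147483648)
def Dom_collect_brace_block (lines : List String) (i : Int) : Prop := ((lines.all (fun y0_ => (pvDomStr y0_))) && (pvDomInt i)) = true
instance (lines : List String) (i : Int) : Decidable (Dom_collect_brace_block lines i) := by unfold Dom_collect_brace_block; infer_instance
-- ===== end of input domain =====

-- B replaces A's single mutable while-loop (index, depth and block accumulated together, break mid-loop)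
-- by a two-phase table scan: a cumulative-depth table over lines[i:], then a search for the first
-- closing line, returning a slice of the tail (objective: alternative decomposition, same O(n) cost).

-- ===== PORT A =====
-- A's while-loop: fuel = number of remaining indices (n - i); lines[i] via pyGet? (Python semantics,
-- including negative-index wraparound). The two 'raise SyntaxError' paths return the loop state
-- instead (no value in Python); Pre_ excludes them.
def goA (lines : List String) : Nat → Int → Int → List String → List String × Int
  | 0, i, _depth, block => (block, i)
  | fuel+1, i, depth, block =>
    match PySem.List.pyGet? lines i with
    | none => (block, i)   -- IndexError path, outside Pre_
    | some s =>
      let depth1 := if PySem.Str.isIn "{" s then depth + (PySem.Str.count s "{" : Int) else depth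
      let block1 := block ++ [s]
      if PySem.Str.isIn "}" s then
        let depth2 := depth1 - (PySem.Str.count s "}" : Int)
        if depth2 ≤ 0 then (block1, i + 1)   -- break (SyntaxError when depth2 < 0 is outside Pre_)
        else goA lines fuel (i + 1) depth2 block1
      else goA lines fuel (i + 1) depth1 block1

def collect_brace_block (lines : List String) (i : Int) : List String × Int :=
  goA lines (((lines.length : Int) - i).toNat) i 0 []

-- ===== PORT B =====
def deltaB (s : String) : Int := (PySem.Str.count s "{" : Int) - (PySem.Str.count s "}" : Int)

-- cum table: running sums d + x (Source B's first loop)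
def cumsumB : List Int → Int → List Int
  | [], _ => []
  | x :: t, d => (d + x) :: cumsumB t (d + x)

-- Source B's enumerate search: first j with '}' in tail[j] and cum[j] <= 0, with that cum value
def findCloseB : List (String × Int) → Option (Nat × Int)
  | [] => none
  | (s, c) :: t =>
    if PySem.Str.isIn "}" s && decide (c ≤ 0) then some (0, c)
    else (findCloseB t).map (fun p => (p.1 + 1, p.2))

def collect_brace_block_alt (lines : List String) (i : Int) : List String × Int :=
  let tail := PySem.List.slice lines (some i) none
  let cum := cumsumB (tail.map deltaB) 0
  match findCloseB (tail.zip cum) with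
  | some (j, _c) => (PySem.List.slice tail none (some ((j : Int) + 1)), i + (j : Int) + 1)
      -- the 'cum[j] < 0' raise is outside Pre_
  | none => (tail, i + (tail.length : Int))   -- the 'd != 0' raise is outside Pre_

-- ===== PRECONDITION & SPEC =====
-- brace balance of one line and cumulative depth after line j of the tail lines[i:]
def pvBal (s : String) : Int := (PySem.Str.count s "{" : Int) - (PySem.Str.count s "}" : Int)
def pvCum (tail : List String) (j : Nat) : Int := ((tail.take (j+1)).map pvBal).sum
-- line j of the tail is a closing line: it contains '}' and the cumulative depth there is ≤ 0
def pvCloses (tail : List String) (j : Nat) : Prop :=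
  PySem.Str.isIn "}" (tail.getD j "") = true ∧ pvCum tail j ≤ 0

-- Pre_ excludes (a) negative i, where A's direct lines[i] indexing wraps around to the end of the
-- list and re-traverses lines (an accident of Python negative indexing on which B's slice-based
-- scan naturally raises or returns only the un-wrapped tail), and (b) inputs whose brace block is
-- unbalanced — the cumulative depth at the first closing line of lines[i:] is negative, or there
-- is no closing line and the total depth is nonzero — on which A raises SyntaxError.
def Pre_collect_brace_block (lines : List String) (i : Int) : Prop :=
  0 ≤ i ∧
  (∀ j, j < (lines.drop i.toNat).length →
    (pvCloses (lines.drop i.toNat) j ∧ ∀ j', j' < j → ¬ pvCloses (lines.drop i.toNat) j') →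
    pvCum (lines.drop i.toNat) j = 0) ∧
  ((∀ j, j < (lines.drop i.toNat).length → ¬ pvCloses (lines.drop i.toNat) j) →
    ((lines.drop i.toNat).map pvBal).sum = 0)
instance (lines : List String) (i : Int) : Decidable (Pre_collect_brace_block lines i) := by
  unfold Pre_collect_brace_block pvCloses; infer_instance

def pvWitness_collect_brace_block : List String × Int := (["x = {", "1, 2,", "};"], 0)

def Spec_collect_brace_block (lines : List String) (i : Int) (out : List String × Int) : Prop := out = collect_brace_block_alt lines i
instance (lines : List String) (i : Int) (out : List String × Int) : Decidable (Spec_collect_brace_block lines i out) := by unfold Spec_collect_brace_block; infer_instance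

-- ===== CLAIM (what is proved, stated in full; the proofs are below) =====
def Claim_equal_collect_brace_block : Prop := ∀ (lines : List String) (i : Int), Dom_collect_brace_block lines i → Pre_collect_brace_block lines i → Spec_collect_brace_block lines i (collect_brace_block lines i)

-- ===== LEMMAS AND PROOFS =====

theorem go_not_infix (sub : List Char) : ∀ (fuel : Nat) (s : List Char) (acc : Nat), ¬ sub <:+: s → PySem.Chars.count.go sub fuel s acc = acc := by
  intro fuel
  induction fuel with
  | zero => intro s acc _; cases s <;> rfl
  | succ n ih =>
    intro s acc h
    cases s with
    | nil => rfl
    | cons a t =>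
      rw [PySem.Chars.count.go]
      have hp : ¬ sub.isPrefixOf (a :: t) = true := by
        intro hpre
        exact h ((List.isPrefixOf_iff_prefix.mp hpre).isInfix)
      simp only [hp]
      exact ih t acc (fun hi => h (List.infix_cons hi))

theorem count_eq_zero_of_not_isIn (s sub : String) (hs : sub.toList ≠ []) (h : PySem.Str.isIn sub s = false) : PySem.Str.count s sub = 0 := by
  simp only [PySem.Str.isIn_eq] at h
  have hni : ¬ sub.toList <:+: s.toList := (PySem.Chars.isIn_eq_false_iff _ _).mp h
  simp only [PySem.Str.count_eq, PySem.Chars.count]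
  simp [List.isEmpty_iff, hs]
  exact go_not_infix _ _ _ _ hni

-- A's guarded depth update equals the unguarded one (s.count("{") = 0 when "{" not in s)
theorem depth1_eq (s : String) (d : Int) :
    (if PySem.Str.isIn "{" s then d + (PySem.Str.count s "{" : Int) else d)
      = d + (PySem.Str.count s "{" : Int) := by
  by_cases h : PySem.Str.isIn "{" s = true
  · rw [if_pos h]
  · have hc := count_eq_zero_of_not_isIn s "{" (by decide) (by simpa using h)
    rw [if_neg (by simpa using h), hc]
    simp

theorem deltaB_chars (s : String) : deltaB s
    = (PySem.Chars.count s.toList ['{'] : Int) - (PySem.Chars.count s.toList ['}'] : Int) := by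
  simp [deltaB]

-- Main loop/table correspondence: A's loop started at index pre.length over pre ++ tail computes
-- exactly B's table search over tail.
theorem goA_eq : ∀ (tail pre : List String) (d : Int) (block : List String),
    goA (pre ++ tail) tail.length (pre.length : Int) d block =
      match findCloseB (tail.zip (cumsumB (tail.map deltaB) d)) with
      | some (j, _) => (block ++ tail.take (j+1), (pre.length : Int) + (j : Int) + 1)
      | none => (block ++ tail, (pre.length : Int) + (tail.length : Int)) := by
  intro tail
  induction tail with
  | nil => intro pre d block; simp [goA, cumsumB, findCloseB]
  | cons s t ih =>
    intro pre d block
    have hget : PySem.List.pyGet? (pre ++ s :: t) (pre.length : Int) = some s :=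
      PySem.List.pyGet?_append_length _ _ _
    have hrec := ih (pre ++ [s]) (d + deltaB s) (block ++ [s])
    simp only [List.append_assoc, List.singleton_append, List.length_append,
      List.length_singleton, List.zip] at hrec
    have hcast : ((pre.length + 1 : Nat) : Int) = (pre.length : Int) + 1 := by push_cast; ring
    rw [hcast] at hrec
    simp only [List.length_cons, goA, hget, depth1_eq, List.map_cons, cumsumB, List.zip,
      List.zipWith_cons_cons, findCloseB, deltaB_chars]
    have e1 : ((PySem.Str.count s "{" : Nat) : Int) = ((PySem.Chars.count s.toList ['{'] : Nat) : Int) := by simp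
    have e2 : ((PySem.Str.count s "}" : Nat) : Int) = ((PySem.Chars.count s.toList ['}'] : Nat) : Int) := by simp
    have e3 : PySem.Str.isIn "}" s = PySem.Chars.isIn ['}'] s.toList := by simp
    simp only [e1, e2, e3]
    have hs1 : d + ((PySem.Chars.count s.toList ['{'] : Int) - (PySem.Chars.count s.toList ['}'] : Int)) = d + deltaB s := by rw [deltaB_chars]
    have hs2 : d + (PySem.Chars.count s.toList ['{'] : Int) - (PySem.Chars.count s.toList ['}'] : Int) = d + deltaB s := by rw [deltaB_chars]; ring
    simp only [hs1, hs2]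
    by_cases h1 : PySem.Chars.isIn ['}'] s.toList = true
    · by_cases h2 : d + deltaB s ≤ 0
      · rw [if_pos h1, if_pos h2, if_pos (by simp [h1, h2])]
        simp
      · rw [if_pos h1, if_neg h2, if_neg (by simp [h1, h2]), hrec]
        cases hfc : findCloseB (List.zipWith Prod.mk t (cumsumB (List.map deltaB t) (d + deltaB s))) with
        | none => simp; omega
        | some p => simp; omega
    · have hc0 : (PySem.Chars.count s.toList ['}'] : Int) = 0 := by
        have := count_eq_zero_of_not_isIn s "}" (by decide) (by simpa using h1)
        simpa using this
      have hs3 : d + (PySem.Chars.count s.toList ['{'] : Int) = d + deltaB s := by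
        rw [deltaB_chars, hc0]; ring
      rw [if_neg h1, if_neg (by simp [h1]), hs3, hrec]
      cases hfc : findCloseB (List.zipWith Prod.mk t (cumsumB (List.map deltaB t) (d + deltaB s))) with
      | none => simp; omega
      | some p => simp; omega

-- ===== VERDICT (by name: the statement is the Claim_ definition above) =====
theorem collect_brace_block_spec : Claim_equal_collect_brace_block := by
  intro lines i _hdom hpre
  obtain ⟨hi, -⟩ := hpre
  obtain ⟨k, rfl⟩ : ∃ k : Nat, i = (k : Int) := ⟨i.toNat, (Int.toNat_of_nonneg hi).symm⟩
  unfold Spec_collect_brace_block collect_brace_block collect_brace_block_alt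
  have htail : PySem.List.slice lines (some (k : Int)) none = lines.drop k :=
    PySem.List.slice_from_natCast _ _
  by_cases hk : k ≤ lines.length
  · have hlen : (lines.take k).length = k := by simp [hk]
    have hfuel : (((lines.length : Int) - (k : Int)).toNat) = (lines.drop k).length := by
      rw [List.length_drop]; omega
    have hgo := goA_eq (lines.drop k) (lines.take k) 0 []
    rw [List.take_append_drop, hlen] at hgo
    rw [hfuel]
    dsimp only
    rw [hgo, htail]
    cases hfc : findCloseB ((lines.drop k).zip (cumsumB ((lines.drop k).map deltaB) 0)) with
    | none => simp
    | some p =>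
      have hslice : PySem.List.slice (lines.drop k) none (some ((p.1 : Int) + 1))
          = (lines.drop k).take (p.1 + 1) := by
        rw [show ((p.1 : Int) + 1) = ((p.1 + 1 : Nat) : Int) by push_cast; ring,
          PySem.List.slice_to_natCast]
      simp [hslice]
  · have hfuel : (((lines.length : Int) - (k : Int)).toNat) = 0 := by omega
    have hdrop : lines.drop k = [] := List.drop_eq_nil_of_le (by omega)
    rw [hfuel]
    dsimp only
    rw [htail, hdrop]
    simp [goA, cumsumB, findCloseB]
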